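-- pv_equiv track=rewrite | github.com/DioGilbran/TA_AKA_DIO_RELI | akaaa.py | collaborative_filtering_recursive
-- ===== SOURCE A (Python) =====
-- def collaborative_filtering_recursive(ratings, target_user, user_index=0, similarities=None):
--     if similarities is None:
--         similarities = []
--     if user_index == len(ratings):
--         return similarities
--     if user_index != target_user:
--         similarity = sum(r1 * r2 for r1, r2 in zip(ratings[target_user], ratings[user_index]))
--         similarities.append((user_index, similarity))
--     return collaborative_filtering_recursive(ratings, target_user, user_index + 1, similarities)
-- ===== SOURCE B (Python) =====
-- def collaborative_filtering_recursive(ratings, target_user, user_index=0, similarities=None):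
--     if similarities is None:
--         similarities = []
--     for i in range(user_index, len(ratings)):
--         if i != target_user:
--             similarities.append((i, sum(r1 * r2 for r1, r2 in zip(ratings[target_user], ratings[i]))))
--     return similarities
-- ===== Notes on version B (the rewrite author's own statement) =====
-- stated objective: idiomatic
-- what changed: Replaces the tail recursion (one Python call frame per user) with a single explicit for-loop over range(user_index, len(ratings)), keeping the same appends in the same order.
import Mathlib
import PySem

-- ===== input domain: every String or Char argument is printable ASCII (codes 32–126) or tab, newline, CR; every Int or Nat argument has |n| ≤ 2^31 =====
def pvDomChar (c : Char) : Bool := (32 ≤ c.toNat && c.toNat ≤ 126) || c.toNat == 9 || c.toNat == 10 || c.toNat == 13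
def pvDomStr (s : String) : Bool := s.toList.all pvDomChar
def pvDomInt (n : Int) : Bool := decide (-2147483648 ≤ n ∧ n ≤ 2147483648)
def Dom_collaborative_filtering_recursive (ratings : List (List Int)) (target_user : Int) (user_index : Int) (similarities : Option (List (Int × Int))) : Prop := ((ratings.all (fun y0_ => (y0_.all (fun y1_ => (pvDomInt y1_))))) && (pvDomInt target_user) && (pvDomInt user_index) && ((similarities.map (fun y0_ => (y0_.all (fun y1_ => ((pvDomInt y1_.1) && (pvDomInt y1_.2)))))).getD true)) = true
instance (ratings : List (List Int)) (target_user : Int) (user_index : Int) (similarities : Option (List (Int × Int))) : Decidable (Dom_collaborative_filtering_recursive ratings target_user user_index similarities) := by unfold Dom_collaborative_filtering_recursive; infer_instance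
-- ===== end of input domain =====

-- B replaces A's one-call-frame-per-user tail recursion by a single explicit for-loop
-- (same appends, same order); equivalence is about the RETURN value only (both Pythons
-- append to a caller-supplied list in the same way).

-- ===== PORT A =====
-- sum(r1 * r2 for r1, r2 in zip(a, b))
def pvDotA (xs ys : List Int) : Int := (xs.zip ys).foldl (fun s p => s + p.1 * p.2) 0

-- fuel-indexed transcription of A's recursion; inside Pre_ the fuel supplied below is
-- never exhausted (fuel 0 is where the Python recursion would run past the end).
-- ratings[i] is PySem.List.pyGet?; '.getD []' only fills the none (IndexError) case,
-- which Pre_ excludes.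
def pvCfrA (ratings : List (List Int)) (target_user : Int) : Int → List (Int × Int) → Nat → List (Int × Int)
  | _, sims, 0 => sims
  | u, sims, fuel+1 =>
    if u = (ratings.length : Int) then sims
    else
      let sims' := if u ≠ target_user then
          sims ++ [(u, pvDotA ((PySem.List.pyGet? ratings target_user).getD [])
                             ((PySem.List.pyGet? ratings u).getD []))]
        else sims
      pvCfrA ratings target_user (u+1) sims' fuel

def collaborative_filtering_recursive (ratings : List (List Int)) (target_user : Int) (user_index : Int) (similarities : Option (List (Int × Int))) : List (Int × Int) :=
  pvCfrA ratings target_user user_index (similarities.getD [])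
    (((ratings.length : Int) - user_index).toNat + 1)

-- ===== PORT B =====
def pvDotB (xs ys : List Int) : Int := (xs.zip ys).foldl (fun s p => s + p.1 * p.2) 0

def collaborative_filtering_recursive_alt (ratings : List (List Int)) (target_user : Int) (user_index : Int) (similarities : Option (List (Int × Int))) : List (Int × Int) :=
  (PySem.List.pyRange user_index (ratings.length : Int) 1).foldl
    (fun acc i =>
      if i ≠ target_user then
        acc ++ [(i, pvDotB ((PySem.List.pyGet? ratings target_user).getD [])
                           ((PySem.List.pyGet? ratings i).getD []))]
      else acc)
    (similarities.getD [])

-- ===== PRECONDITION & SPEC =====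
-- Pre_ is exactly the inputs on which Python A returns: the walk from user_index must
-- reach len(ratings) (user_index ≤ len), and every row A indexes must exist — either
-- the walk is empty (user_index = len), or its single step is the skipped target row
-- (user_index = target_user = len-1), or user_index and target_user are both valid
-- (possibly negative) Python indices; elsewhere A raises IndexError/RecursionError.
def Pre_collaborative_filtering_recursive (ratings : List (List Int)) (target_user : Int) (user_index : Int) (similarities : Option (List (Int × Int))) : Prop :=
  user_index ≤ (ratings.length : Int) ∧
    (user_index = (ratings.length : Int) ∨
     (user_index = target_user ∧ user_index = (ratings.length : Int) - 1) ∨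
     (-(ratings.length : Int) ≤ user_index ∧ -(ratings.length : Int) ≤ target_user ∧
        target_user < (ratings.length : Int)))
instance (ratings : List (List Int)) (target_user : Int) (user_index : Int) (similarities : Option (List (Int × Int))) : Decidable (Pre_collaborative_filtering_recursive ratings target_user user_index similarities) := by unfold Pre_collaborative_filtering_recursive; infer_instance

def pvWitness_collaborative_filtering_recursive : List (List Int) × Int × Int × (Option (List (Int × Int))) := ([[1, 2], [3, 4]], 0, 0, none)

def Spec_collaborative_filtering_recursive (ratings : List (List Int)) (target_user : Int) (user_index : Int) (similarities : Option (List (Int × Int))) (out : List (Int × Int)) : Prop := out = collaborative_filtering_recursive_alt ratings target_user user_index similarities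
instance (ratings : List (List Int)) (target_user : Int) (user_index : Int) (similarities : Option (List (Int × Int))) (out : List (Int × Int)) : Decidable (Spec_collaborative_filtering_recursive ratings target_user user_index similarities out) := by unfold Spec_collaborative_filtering_recursive; infer_instance

-- ===== CLAIM (what is proved, stated in full; the proofs are below) =====
def Claim_equal_collaborative_filtering_recursive : Prop := ∀ (ratings : List (List Int)) (target_user : Int) (user_index : Int) (similarities : Option (List (Int × Int))), Dom_collaborative_filtering_recursive ratings target_user user_index similarities → Pre_collaborative_filtering_recursive ratings target_user user_index similarities → Spec_collaborative_filtering_recursive ratings target_user user_index similarities (collaborative_filtering_recursive ratings target_user user_index similarities)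

-- ===== LEMMAS AND PROOFS =====

lemma pvCfr_eq_foldl (ratings : List (List Int)) (target_user : Int) :
    ∀ (fuel : Nat) (u : Int) (sims : List (Int × Int)),
      u ≤ (ratings.length : Int) → ((ratings.length : Int) - u).toNat < fuel →
      pvCfrA ratings target_user u sims fuel =
        (PySem.List.pyRange u (ratings.length : Int) 1).foldl
          (fun acc i =>
            if i ≠ target_user then
              acc ++ [(i, pvDotB ((PySem.List.pyGet? ratings target_user).getD [])
                                 ((PySem.List.pyGet? ratings i).getD []))]
            else acc) sims := by
  intro fuel
  induction fuel with
  | zero => intro u sims _ h; omega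
  | succ n ih =>
    intro u sims hle hf
    by_cases hu : u = (ratings.length : Int)
    · subst hu
      simp [pvCfrA, PySem.List.pyRange_one_eq_nil le_rfl]
    · have hlt : u < (ratings.length : Int) := lt_of_le_of_ne hle hu
      rw [PySem.List.pyRange_one_cons hlt]
      simp only [pvCfrA, if_neg hu, List.foldl_cons]
      rw [ih (u+1) _ (by omega) (by omega)]
      rfl

theorem collaborative_filtering_recursive_spec : Claim_equal_collaborative_filtering_recursive := by
  intro ratings target_user user_index similarities _ hpre
  unfold Spec_collaborative_filtering_recursive collaborative_filtering_recursive collaborative_filtering_recursive_alt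
  exact pvCfr_eq_foldl ratings target_user _ user_index (similarities.getD []) hpre.1 (by omega)
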